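-- pv_equiv track=rewrite | github.com/Joormann-Media/Joormann-Media-DevicePortal | app/api/routes_stream.py | _sanitize_stream_folder_name
-- ===== SOURCE A (Python) =====
-- def _sanitize_stream_folder_name(stream_name: str, stream_slug: str) -> str:
--     raw = (stream_name or '').strip()
--     if not raw:
--         raw = (stream_slug or '').strip()
--     if not raw:
--         raw = 'stream'
--
--     safe_chars = []
--     last_was_sep = False
--     for ch in raw:
--         if ch.isalnum():
--             safe_chars.append(ch.lower())
--             last_was_sep = False
--             continue
--         if ch in (' ', '-', '_', '.'):
--             if not last_was_sep:
--                 safe_chars.append('-')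
--                 last_was_sep = True
--             continue
--         # drop unsupported chars
--
--     folder = ''.join(safe_chars).strip('-')
--     if folder == '':
--         folder = 'stream'
--     if len(folder) > 120:
--         folder = folder[:120].rstrip('-') or 'stream'
--     return folder
-- ===== SOURCE B (Python) =====
-- import re
--
-- def _sanitize_stream_folder_name(stream_name: str, stream_slug: str) -> str:
--     raw = (stream_name or '').strip() or (stream_slug or '').strip() or 'stream'
--     mapped = ''.join(
--         ch.lower() if ch.isalnum() else ('-' if ch in ' -_.' else '')
--         for ch in raw
--     )
--     folder = re.sub(r'-+', '-', mapped).strip('-')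
--     if not folder:
--         folder = 'stream'
--     if len(folder) > 120:
--         folder = folder[:120].rstrip('-') or 'stream'
--     return folder
-- ===== Notes on version B (the rewrite author's own statement) =====
-- stated objective: idiomatic
-- what changed: A's single stateful loop (last_was_sep flag deciding per character whether to emit '-') is replaced by a stateless per-char map/join allowing adjacent '-' runs, followed by a separate regex pass re.sub('-+','-') that collapses the runs; the or-chained preamble replaces A's reassignment sequence.
import Mathlib
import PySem

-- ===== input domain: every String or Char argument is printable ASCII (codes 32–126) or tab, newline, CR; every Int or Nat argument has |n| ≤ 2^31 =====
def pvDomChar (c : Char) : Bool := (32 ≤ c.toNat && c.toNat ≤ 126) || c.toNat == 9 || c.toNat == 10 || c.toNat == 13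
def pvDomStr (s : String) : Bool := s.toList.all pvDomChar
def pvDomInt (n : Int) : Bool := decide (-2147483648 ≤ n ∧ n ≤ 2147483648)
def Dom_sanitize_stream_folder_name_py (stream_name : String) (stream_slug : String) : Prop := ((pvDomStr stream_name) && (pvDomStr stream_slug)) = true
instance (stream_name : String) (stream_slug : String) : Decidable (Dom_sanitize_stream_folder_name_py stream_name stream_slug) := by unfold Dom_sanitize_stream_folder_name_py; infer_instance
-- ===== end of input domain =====

-- B replaces A's last_was_sep state machine by a stateless per-char map/join followed by a
-- separate run-collapsing pass (re.sub('-+','-')); objective: idiomatic, same cost.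

-- ===== PORT A =====
-- exact port of str.rstrip('-') (strip only '-' characters from the right end)
def pvRstripDash (l : List Char) : List Char := (l.reverse.dropWhile (fun c => c == '-')).reverse

def pvIsSep (c : Char) : Bool := c == ' ' || c == '-' || c == '_' || c == '.'

-- one iteration of A's for-loop: state = (safe_chars, last_was_sep)
def pvStepA (st : List Char × Bool) (ch : Char) : List Char × Bool :=
  if PySem.Chars.isalnum ch then (st.1 ++ [PySem.Chars.lowerChar ch], false)
  else if pvIsSep ch then (if st.2 then st else (st.1 ++ ['-'], true))
  else st

def sanitize_stream_folder_name_py (stream_name : String) (stream_slug : String) : String :=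
  let raw := PySem.Chars.strip stream_name.toList
  let raw := if raw = [] then PySem.Chars.strip stream_slug.toList else raw
  let raw := if raw = [] then "stream".toList else raw
  let st := raw.foldl pvStepA ([], false)
  let folder := PySem.Chars.stripChars st.1 ['-']
  let folder := if folder = [] then "stream".toList else folder
  let folder := if folder.length > 120 then
      (let t := pvRstripDash (folder.take 120); if t = [] then "stream".toList else t)
    else folder
  String.ofList folder

-- ===== PORT B =====
-- Source B's per-char map: alnum → lowered char, separator → '-', anything else dropped
def pvMapB (ch : Char) : List Char :=
  if PySem.Chars.isalnum ch then [PySem.Chars.lowerChar ch]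
  else if ch == ' ' || ch == '-' || ch == '_' || ch == '.' then ['-']
  else []

-- exact port of re.sub(r'-+', '-', ·): collapse every run of '-' to a single '-'
def pvCollapse : List Char → List Char
  | [] => []
  | [c] => [c]
  | c :: c' :: cs =>
    if c == '-' && c' == '-' then pvCollapse (c' :: cs)
    else c :: pvCollapse (c' :: cs)

def sanitize_stream_folder_name_py_alt (stream_name : String) (stream_slug : String) : String :=
  let raw :=
    if PySem.Chars.strip stream_name.toList ≠ [] then PySem.Chars.strip stream_name.toList
    else if PySem.Chars.strip stream_slug.toList ≠ [] then PySem.Chars.strip stream_slug.toList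
    else "stream".toList
  let folder := PySem.Chars.stripChars (pvCollapse (raw.flatMap pvMapB)) ['-']
  let folder := if folder = [] then "stream".toList else folder
  let folder := if folder.length > 120 then
      (let t := pvRstripDash (folder.take 120); if t = [] then "stream".toList else t)
    else folder
  String.ofList folder

-- ===== PRECONDITION & SPEC =====
def Spec_sanitize_stream_folder_name_py (stream_name : String) (stream_slug : String) (out : String) : Prop := out = sanitize_stream_folder_name_py_alt stream_name stream_slug
instance (stream_name : String) (stream_slug : String) (out : String) : Decidable (Spec_sanitize_stream_folder_name_py stream_name stream_slug out) := by unfold Spec_sanitize_stream_folder_name_py; infer_instance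

-- ===== CLAIM (what is proved, stated in full; the proofs are below) =====
def Claim_equal_sanitize_stream_folder_name_py : Prop := ∀ (stream_name : String) (stream_slug : String), Dom_sanitize_stream_folder_name_py stream_name stream_slug → Spec_sanitize_stream_folder_name_py stream_name stream_slug (sanitize_stream_folder_name_py stream_name stream_slug)

-- ===== LEMMAS AND PROOFS =====

-- A's loop, with the accumulator peeled off (the list of characters it appends)
def pvRunA : List Char → Bool → List Char
  | [], _ => []
  | c :: cs, flag =>
    if PySem.Chars.isalnum c then PySem.Chars.lowerChar c :: pvRunA cs false
    else if pvIsSep c then (if flag then pvRunA cs true else '-' :: pvRunA cs true)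
    else pvRunA cs flag

-- flag-threaded version of pvCollapse (flag = "the previous emitted char was '-'")
def pvCollapseF : List Char → Bool → List Char
  | [], _ => []
  | c :: cs, flag =>
    if c == '-' then (if flag then pvCollapseF cs true else '-' :: pvCollapseF cs true)
    else c :: pvCollapseF cs false

theorem pvFoldA_eq (cs : List Char) : ∀ (acc : List Char) (flag : Bool),
    (cs.foldl pvStepA (acc, flag)).1 = acc ++ pvRunA cs flag := by
  induction cs with
  | nil => intro acc flag; simp [pvRunA]
  | cons c cs ih =>
    intro acc flag
    simp only [List.foldl_cons, pvStepA, pvRunA]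
    by_cases h1 : PySem.Chars.isalnum c = true
    · simp [h1, ih]
    · by_cases h2 : pvIsSep c = true
      · cases flag <;> simp [h1, h2, ih]
      · simp [h1, h2, ih]

theorem pvCollapse_eq_F (l : List Char) : pvCollapse l = pvCollapseF l false := by
  induction l with
  | nil => rfl
  | cons c cs ih =>
    cases cs with
    | nil => by_cases h : c == '-' <;> simp_all [pvCollapse, pvCollapseF]
    | cons c' cs' =>
      by_cases h : c == '-'
      · have hc : c = '-' := by simpa using h
        subst hc
        by_cases h' : c' == '-'
        · have hc' : c' = '-' := by simpa using h'
          subst hc'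
          simp only [pvCollapse, BEq.rfl, Bool.and_self, if_pos]
          rw [ih]
          simp [pvCollapseF]
        · simp only [pvCollapse, BEq.rfl, Bool.true_and, h', Bool.false_eq_true, if_false]
          rw [ih]
          simp [pvCollapseF, h']
      · simp only [pvCollapse, h, Bool.false_and, Bool.false_eq_true, if_false]
        rw [ih]
        simp [pvCollapseF, h]

theorem pvLower_ne_dash (c : Char) (h : PySem.Chars.isalnum c = true) :
    (PySem.Chars.lowerChar c == '-') = false := by
  have toNatLe : ∀ a b : Char, a ≤ b → a.toNat ≤ b.toNat := fun a b hab => by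
    exact_mod_cast Char.le_def.mp hab
  simp only [PySem.Chars.isalnum, PySem.Chars.isalpha, PySem.Chars.isdigit, PySem.Chars.isupper,
    PySem.Chars.islower, Bool.or_eq_true, Bool.and_eq_true, decide_eq_true_eq] at h
  rw [beq_eq_false_iff_ne]
  simp only [PySem.Chars.lowerChar, PySem.Chars.isupper, Bool.and_eq_true, decide_eq_true_eq]
  split_ifs with hu
  · intro hc
    have hL : 65 ≤ c.toNat := toNatLe _ _ hu.1
    have hU : c.toNat ≤ 90 := toNatLe _ _ hu.2
    have hv : (Char.ofNat (c.toNat + 32)).toNat = c.toNat + 32 := by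
      unfold Char.ofNat
      rw [dif_pos (Or.inl (by omega))]
      rfl
    have h45 := congrArg Char.toNat hc
    rw [hv] at h45
    have hd : ('-' : Char).toNat = 45 := by decide
    omega
  · intro hc
    have h45 : c.toNat = 45 := by rw [hc]; decide
    rcases h with (h | h) | h
    · exact hu ⟨h.1, h.2⟩
    · have h97 : (97:Nat) ≤ c.toNat := toNatLe _ _ h.1; omega
    · have h48 : (48:Nat) ≤ c.toNat := toNatLe _ _ h.1; omega

theorem pvRunA_eq_collapseF (cs : List Char) : ∀ flag,
    pvRunA cs flag = pvCollapseF (cs.flatMap pvMapB) flag := by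
  induction cs with
  | nil => intro flag; rfl
  | cons c cs ih =>
    intro flag
    simp only [List.flatMap_cons, pvMapB, pvRunA, pvIsSep]
    by_cases h1 : PySem.Chars.isalnum c = true
    · simp only [h1, if_pos, List.singleton_append]
      rw [ih false]
      simp [pvCollapseF, pvLower_ne_dash c h1]
    · by_cases h2 : (c == ' ' || c == '-' || c == '_' || c == '.') = true
      · simp only [h1, h2, if_pos, Bool.false_eq_true, if_false, List.singleton_append]
        cases flag <;> simp [pvCollapseF, ih]
      · simp only [h1, h2, Bool.false_eq_true, if_false, List.nil_append]
        exact ih flag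

theorem pvChars_eq (raw : List Char) :
    (raw.foldl pvStepA ([], false)).1 = pvCollapse (raw.flatMap pvMapB) := by
  rw [pvFoldA_eq, pvCollapse_eq_F, pvRunA_eq_collapseF]
  rfl

-- ===== VERDICT (by name: the statement is the Claim_ definition above) =====
theorem sanitize_stream_folder_name_py_spec : Claim_equal_sanitize_stream_folder_name_py := by
  intro stream_name stream_slug _
  unfold Spec_sanitize_stream_folder_name_py
  unfold sanitize_stream_folder_name_py sanitize_stream_folder_name_py_alt
  have hraw : (if (if PySem.Chars.strip stream_name.toList = [] then PySem.Chars.strip stream_slug.toList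
        else PySem.Chars.strip stream_name.toList) = [] then "stream".toList
        else if PySem.Chars.strip stream_name.toList = [] then PySem.Chars.strip stream_slug.toList
        else PySem.Chars.strip stream_name.toList) =
      (if PySem.Chars.strip stream_name.toList ≠ [] then PySem.Chars.strip stream_name.toList
        else if PySem.Chars.strip stream_slug.toList ≠ [] then PySem.Chars.strip stream_slug.toList
        else "stream".toList) := by
    by_cases h1 : PySem.Chars.strip stream_name.toList = [] <;>
      by_cases h2 : PySem.Chars.strip stream_slug.toList = [] <;> simp [h1, h2]
  simp only []
  rw [pvChars_eq, hraw]
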